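-- pv_equiv track=rewrite | github.com/TAGOOZ/GLM4.7-opencode-proxy | glm_cli/signature_helper.py | build_sorted_payload
-- ===== SOURCE A (Python) =====
-- def build_sorted_payload(
--     timestamp: int,
--     request_id: str,
--     user_id: str
-- ) -> str:
--     """Build sortedPayload string matching the frontend implementation."""
--     items = {
--         "timestamp": str(timestamp),
--         "requestId": request_id,
--         "user_id": user_id
--     }
--     ordered = sorted(items.items(), key=lambda kv: kv[0])
--     flat = []
--     for key, value in ordered:
--         flat.append(key)
--         flat.append(str(value))
--     return ",".join(flat)
-- ===== SOURCE B (Python) =====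
-- def build_sorted_payload(
--     timestamp: int,
--     request_id: str,
--     user_id: str
-- ) -> str:
--     """Closed form: the three keys are constants whose sorted order is known."""
--     return "requestId," + str(request_id) + ",timestamp," + str(timestamp) + ",user_id," + str(user_id)
-- ===== Notes on version B (the rewrite author's own statement) =====
-- stated objective: simpler
-- what changed: B replaces the dict build, runtime sorted() and flatten loop with a closed-form concatenation, since the three keys are constants whose sorted order (requestId, timestamp, user_id) is statically known.
import Mathlib
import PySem

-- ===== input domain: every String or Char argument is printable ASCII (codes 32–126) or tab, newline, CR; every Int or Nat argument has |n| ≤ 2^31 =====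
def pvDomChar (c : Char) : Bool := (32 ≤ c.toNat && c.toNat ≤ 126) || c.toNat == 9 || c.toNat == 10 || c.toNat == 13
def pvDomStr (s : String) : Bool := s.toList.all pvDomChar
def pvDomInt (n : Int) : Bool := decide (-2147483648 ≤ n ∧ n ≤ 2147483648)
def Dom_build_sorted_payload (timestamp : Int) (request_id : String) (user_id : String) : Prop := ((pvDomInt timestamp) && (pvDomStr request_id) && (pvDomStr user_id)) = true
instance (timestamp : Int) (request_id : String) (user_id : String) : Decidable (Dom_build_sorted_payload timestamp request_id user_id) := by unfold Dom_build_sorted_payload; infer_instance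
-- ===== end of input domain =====

-- B replaces the dict build, runtime sorted() and flatten loop with a closed-form
-- concatenation in the statically-known sorted key order (objective: simpler).

-- ===== PORT A =====
def build_sorted_payload (timestamp : Int) (request_id : String) (user_id : String) : String :=
  let items : PySem.Dict String String :=
    ((PySem.Dict.empty.insert "timestamp" (PySem.Int.toStr timestamp)).insert
        "requestId" request_id).insert "user_id" user_id
  let ordered := PySem.List.sorted items.items (fun kv => kv.1) false
  let flat := ordered.foldl (fun acc kv => (acc ++ [kv.1]) ++ [kv.2]) []
  PySem.Str.join "," flat

-- ===== PORT B =====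
def build_sorted_payload_alt (timestamp : Int) (request_id : String) (user_id : String) : String :=
  "requestId," ++ request_id ++ ",timestamp," ++ PySem.Int.toStr timestamp ++ ",user_id," ++ user_id

-- ===== PRECONDITION & SPEC =====
def Spec_build_sorted_payload (timestamp : Int) (request_id : String) (user_id : String) (out : String) : Prop := out = build_sorted_payload_alt timestamp request_id user_id
instance (timestamp : Int) (request_id : String) (user_id : String) (out : String) : Decidable (Spec_build_sorted_payload timestamp request_id user_id out) := by unfold Spec_build_sorted_payload; infer_instance

-- ===== CLAIM (what is proved, stated in full; the proofs are below) =====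
def Claim_equal_build_sorted_payload : Prop := ∀ (timestamp : Int) (request_id : String) (user_id : String), Dom_build_sorted_payload timestamp request_id user_id → Spec_build_sorted_payload timestamp request_id user_id (build_sorted_payload timestamp request_id user_id)

-- ===== LEMMAS AND PROOFS =====

-- The sorted order of the three fixed keys: requestId < timestamp < user_id.
theorem sorted_three (t r u : String) :
    PySem.List.sorted [("timestamp", t), ("requestId", r), ("user_id", u)]
      (fun kv : String × String => kv.1) false
      = [("requestId", r), ("timestamp", t), ("user_id", u)] := by
  apply PySem.List.sorted_eq_of_perm_of_pairwise_lt
  · exact List.Perm.swap' _ _ (List.Perm.refl _)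
  · simp [List.pairwise_cons]
    decide

theorem items_three (t r u : String) :
    (((PySem.Dict.empty.insert "timestamp" t).insert "requestId" r).insert
        "user_id" u).items
      = [("timestamp", t), ("requestId", r), ("user_id", u)] := by
  simp [PySem.Dict.insert, PySem.Dict.empty, PySem.Dict.contains]

-- ===== VERDICT (by name: the statement is the Claim_ definition above) =====
theorem build_sorted_payload_spec : Claim_equal_build_sorted_payload := by
  intro t r u _
  show build_sorted_payload t r u = build_sorted_payload_alt t r u
  unfold build_sorted_payload build_sorted_payload_alt
  simp only [items_three, sorted_three, List.foldl]
  apply String.ext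
  simp [PySem.Str.join, PySem.Chars.join_cons_cons, PySem.Chars.join_singleton]
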